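-- pv_equiv track=rewrite | github.com/sacha-ichbiah/tinygrad | tinygrad/fft.py | _radix_plan_pow2
-- ===== SOURCE A (Python) =====
-- _radix_plan_cache: dict[int, list[int]] = {}
--
-- def _radix_plan_pow2(n: int) -> list[int]:
--   cached = _radix_plan_cache.get(n)
--   if cached is not None:
--     return cached
--   n0 = n
--   rads: list[int] = []
--   while n % 8 == 0:
--     rads.append(8)
--     n //= 8
--   while n % 4 == 0:
--     rads.append(4)
--     n //= 4
--   while n % 2 == 0:
--     rads.append(2)
--     n //= 2
--   _radix_plan_cache[n0] = rads
--   return rads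
-- ===== SOURCE B (Python) =====
-- _radix_plan_cache: dict[int, list[int]] = {}
--
-- def _radix_plan_pow2(n):
--     cached = _radix_plan_cache.get(n)
--     if cached is not None:
--         return cached
--     m = n
--     k = 0
--     while m % 2 == 0:
--         k += 1
--         m //= 2
--     rads = [8] * (k // 3)
--     if k % 3 == 2:
--         rads.append(4)
--     elif k % 3 == 1:
--         rads.append(2)
--     _radix_plan_cache[n] = rads
--     return rads
-- ===== Notes on version B (the rewrite author's own statement) =====
-- stated objective: simpler
-- what changed: Replaces A's three greedy factor-extraction loops (radix 8, then 4, then 2) by one loop counting the total power of two k, building the plan arithmetically as [8]*(k//3) plus a trailing 4 or 2 from k%3.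
import Mathlib
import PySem

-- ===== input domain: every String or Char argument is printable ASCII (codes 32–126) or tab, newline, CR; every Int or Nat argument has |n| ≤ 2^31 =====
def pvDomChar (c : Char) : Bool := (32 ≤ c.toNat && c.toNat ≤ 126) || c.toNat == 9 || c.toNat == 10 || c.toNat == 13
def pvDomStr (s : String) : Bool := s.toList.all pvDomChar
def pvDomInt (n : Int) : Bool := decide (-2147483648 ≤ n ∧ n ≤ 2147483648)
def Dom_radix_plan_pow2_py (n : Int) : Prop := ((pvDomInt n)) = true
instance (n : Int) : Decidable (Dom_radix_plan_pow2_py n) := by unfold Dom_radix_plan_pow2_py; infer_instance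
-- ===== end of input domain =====

-- B replaces A's three greedy extraction loops (8, then 4, then 2) with one factor-of-two
-- counting loop plus modulo-3 arithmetic; objective: simpler. The module-level cache of the
-- Python versions only memoises the same value, so the ports are the pure computation;
-- equivalence is about the RETURN value (A and B both cache their result by n).
-- Both ports carry a fuel argument (started at n.natAbs) purely as a totality guard: each
-- Python loop divides its variable by ≥ 2 per step, so the fuel never runs out for n ≠ 0;
-- at n = 0 Python loops forever, which Pre_ excludes.

-- ===== PORT A =====
-- while n % 8 == 0: rads.append(8); n //= 8
def aLoop8 : Nat → Int → List Int → Int × List Int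
  | 0, n, acc => (n, acc)
  | f + 1, n, acc =>
    if PySem.Int.mod n 8 = 0 then aLoop8 f (PySem.Int.floordiv n 8) (acc ++ [8]) else (n, acc)

-- while n % 4 == 0: rads.append(4); n //= 4
def aLoop4 : Nat → Int → List Int → Int × List Int
  | 0, n, acc => (n, acc)
  | f + 1, n, acc =>
    if PySem.Int.mod n 4 = 0 then aLoop4 f (PySem.Int.floordiv n 4) (acc ++ [4]) else (n, acc)

-- while n % 2 == 0: rads.append(2); n //= 2
def aLoop2 : Nat → Int → List Int → Int × List Int
  | 0, n, acc => (n, acc)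
  | f + 1, n, acc =>
    if PySem.Int.mod n 2 = 0 then aLoop2 f (PySem.Int.floordiv n 2) (acc ++ [2]) else (n, acc)

def radix_plan_pow2_py (n : Int) : List Int :=
  let f := n.natAbs
  let p8 := aLoop8 f n []
  let p4 := aLoop4 f p8.1 p8.2
  let p2 := aLoop2 f p4.1 p4.2
  p2.2

-- ===== PORT B =====
-- while m % 2 == 0: k += 1; m //= 2
def bCount : Nat → Int → Nat → Int × Nat
  | 0, m, k => (m, k)
  | f + 1, m, k =>
    if PySem.Int.mod m 2 = 0 then bCount f (PySem.Int.floordiv m 2) (k + 1) else (m, k)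

def radix_plan_pow2_py_alt (n : Int) : List Int :=
  let k := (bCount n.natAbs n 0).2
  List.replicate (k / 3) 8 ++ (if k % 3 = 2 then [4] else if k % 3 = 1 then [2] else [])

-- ===== PRECONDITION & SPEC =====
-- Pre_ excludes only n = 0, where A's first while-loop (0 % 8 == 0 forever) never returns.
def Pre_radix_plan_pow2_py (n : Int) : Prop := n ≠ 0
instance (n : Int) : Decidable (Pre_radix_plan_pow2_py n) := by unfold Pre_radix_plan_pow2_py; infer_instance
def pvWitness_radix_plan_pow2_py : Int := 8

def Spec_radix_plan_pow2_py (n : Int) (out : List Int) : Prop := out = radix_plan_pow2_py_alt n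
instance (n : Int) (out : List Int) : Decidable (Spec_radix_plan_pow2_py n out) := by unfold Spec_radix_plan_pow2_py; infer_instance

-- ===== CLAIM (what is proved, stated in full; the proofs are below) =====
def Claim_equal_radix_plan_pow2_py : Prop := ∀ (n : Int), Dom_radix_plan_pow2_py n → Pre_radix_plan_pow2_py n → Spec_radix_plan_pow2_py n (radix_plan_pow2_py n)

-- ===== LEMMAS AND PROOFS =====

-- the number of factors 2 counted by B's loop (with its canonical fuel)
def ctwo (m : Int) : Nat := (bCount m.natAbs m 0).2

theorem bCount_acc : ∀ (f : Nat) (m : Int) (k : Nat), (bCount f m k).2 = k + (bCount f m 0).2 := by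
  intro f
  induction f with
  | zero => intro m k; simp [bCount]
  | succ f ih =>
    intro m k
    by_cases h : PySem.Int.mod m 2 = 0
    · simp only [bCount, if_pos h]
      rw [ih _ (k + 1), ih _ 1]
      omega
    · have hnd : ¬ (2 : Int) ∣ m := by
        rw [PySem.Int.mod_eq_emod_of_pos (by norm_num)] at h
        intro hd; exact h (Int.emod_eq_zero_of_dvd hd)
      simp [bCount, hnd]

theorem bCount_fuel : ∀ (f g : Nat) (m : Int), m ≠ 0 → m.natAbs ≤ f → m.natAbs ≤ g →
    (bCount f m 0).2 = (bCount g m 0).2 := by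
  intro f
  induction f with
  | zero => intro g m h0 hf _; omega
  | succ f ih =>
    intro g m h0 hf hg
    cases g with
    | zero => omega
    | succ g =>
      by_cases h : m % 2 = 0
      · have h' : PySem.Int.mod m 2 = 0 := by
          rw [PySem.Int.mod_eq_emod_of_pos (by norm_num)]; exact h
        have hfd : PySem.Int.floordiv m 2 = m / 2 := PySem.Int.floordiv_eq_ediv_of_pos (by norm_num)
        simp only [bCount, if_pos h', hfd]
        rw [bCount_acc f, bCount_acc g, ih g (m / 2) (by omega) (by omega) (by omega)]
      · have hnd : ¬ (2 : Int) ∣ m := fun hd => h (Int.emod_eq_zero_of_dvd hd)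
        simp [bCount, hnd]

theorem ctwo_even (m : Int) (h0 : m ≠ 0) (h2 : m % 2 = 0) : ctwo m = ctwo (m / 2) + 1 := by
  have h2' : PySem.Int.mod m 2 = 0 := by
    rw [PySem.Int.mod_eq_emod_of_pos (by norm_num)]; exact h2
  have hfd : PySem.Int.floordiv m 2 = m / 2 := PySem.Int.floordiv_eq_ediv_of_pos (by norm_num)
  have hk : m.natAbs = (m.natAbs - 1) + 1 := by omega
  unfold ctwo
  rw [hk]
  simp only [bCount, if_pos h2', hfd]
  rw [bCount_acc, bCount_fuel (m.natAbs - 1) ((m / 2).natAbs) (m / 2) (by omega) (by omega) le_rfl]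
  omega

theorem ctwo_odd (m : Int) (h2 : ¬ m % 2 = 0) : ctwo m = 0 := by
  have h2' : ¬ PySem.Int.mod m 2 = 0 := by
    rw [PySem.Int.mod_eq_emod_of_pos (by norm_num)]; exact h2
  have hnd : ¬ (2 : Int) ∣ m := fun hd => h2 (Int.emod_eq_zero_of_dvd hd)
  unfold ctwo
  cases h : m.natAbs with
  | zero => simp [bCount]
  | succ k => simp [bCount, hnd]

theorem ctwo_pow_dvd : ∀ (a : Nat) (m : Int), m.natAbs ≤ a → m ≠ 0 →
    (2 : Int) ^ (ctwo m) ∣ m ∧ ¬ (2 : Int) ^ (ctwo m + 1) ∣ m := by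
  intro a
  induction a with
  | zero => intro m hm h0; omega
  | succ a ih =>
    intro m hm h0
    by_cases h2 : m % 2 = 0
    · have hrec : ctwo m = ctwo (m / 2) + 1 := ctwo_even m h0 h2
      have hm2 : (m / 2) ≠ 0 ∧ (m / 2).natAbs ≤ a := by constructor <;> omega
      obtain ⟨hd, hnd⟩ := ih (m / 2) hm2.2 hm2.1
      have hmeq : m = 2 * (m / 2) := by omega
      constructor
      · rw [hrec, pow_succ]
        obtain ⟨q, hq⟩ := hd
        exact ⟨q, by linear_combination hmeq + 2 * hq⟩
      · intro hc
        rw [hrec, pow_succ] at hc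
        obtain ⟨q, hq⟩ := hc
        apply hnd
        refine ⟨q, ?_⟩
        have h2' : (2 : Int) * (m / 2) = 2 * (2 ^ (ctwo (m / 2) + 1) * q) := by
          linear_combination hq - hmeq
        exact mul_left_cancel₀ (by norm_num) h2'
    · have : ctwo m = 0 := ctwo_odd m h2
      rw [this]
      refine ⟨one_dvd m, ?_⟩
      intro hc
      simp at hc
      omega

theorem dvd_iff_le_ctwo (m : Int) (h0 : m ≠ 0) (j : Nat) : (2 : Int) ^ j ∣ m ↔ j ≤ ctwo m := by
  obtain ⟨hd, hnd⟩ := ctwo_pow_dvd m.natAbs m le_rfl h0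
  constructor
  · intro h
    by_contra hlt
    exact hnd (dvd_trans (pow_dvd_pow 2 (by omega)) h)
  · intro h
    exact dvd_trans (pow_dvd_pow 2 h) hd

theorem mod8_iff (m : Int) (h0 : m ≠ 0) : m % 8 = 0 ↔ 3 ≤ ctwo m := by
  rw [PySem.Int.emod_eq_zero_iff_dvd, show ((8:Int) = 2 ^ 3) by norm_num, dvd_iff_le_ctwo m h0 3]

theorem mod4_iff (m : Int) (h0 : m ≠ 0) : m % 4 = 0 ↔ 2 ≤ ctwo m := by
  rw [PySem.Int.emod_eq_zero_iff_dvd, show ((4:Int) = 2 ^ 2) by norm_num, dvd_iff_le_ctwo m h0 2]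

theorem mod2_iff (m : Int) (h0 : m ≠ 0) : m % 2 = 0 ↔ 1 ≤ ctwo m := by
  rw [PySem.Int.emod_eq_zero_iff_dvd, show ((2:Int) = 2 ^ 1) by norm_num, dvd_iff_le_ctwo m h0 1]

theorem ctwo_div8 (m : Int) (h0 : m ≠ 0) (h8 : m % 8 = 0) : ctwo (m / 8) = ctwo m - 3 := by
  have e1 : m / 8 = m / 2 / 2 / 2 := by omega
  have c1 := ctwo_even m h0 (by omega)
  have c2 := ctwo_even (m / 2) (by omega) (by omega)
  have c3 := ctwo_even (m / 2 / 2) (by omega) (by omega)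
  rw [e1]
  omega

theorem loop8_spec : ∀ (f : Nat) (n : Int), n.natAbs ≤ f → n ≠ 0 →
    ∃ m, (∀ acc, aLoop8 f n acc = (m, acc ++ List.replicate (ctwo n / 3) 8)) ∧
      m ≠ 0 ∧ ctwo m = ctwo n % 3 ∧ m.natAbs ≤ n.natAbs := by
  intro f
  induction f with
  | zero => intro n hf h0; omega
  | succ f ih =>
    intro n hf h0
    by_cases h8 : n % 8 = 0
    · have h8' : PySem.Int.mod n 8 = 0 := by
        rw [PySem.Int.mod_eq_emod_of_pos (by norm_num)]; exact h8
      have hfd : PySem.Int.floordiv n 8 = n / 8 := PySem.Int.floordiv_eq_ediv_of_pos (by norm_num)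
      have hc3 : 3 ≤ ctwo n := (mod8_iff n h0).mp h8
      have h0' : n / 8 ≠ 0 := by omega
      have hcd : ctwo (n / 8) = ctwo n - 3 := ctwo_div8 n h0 h8
      obtain ⟨m, hrec, hm0, hmc, hmb⟩ := ih (n / 8) (by omega) h0'
      refine ⟨m, ?_, hm0, ?_, by omega⟩
      · intro acc
        simp only [aLoop8, if_pos h8', hfd]
        rw [hrec, hcd]
        have hq : ctwo n / 3 = (ctwo n - 3) / 3 + 1 := by omega
        rw [hq, List.replicate_succ, List.append_assoc]
        rfl
      · rw [hmc, hcd]; omega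
    · have h8' : ¬ PySem.Int.mod n 8 = 0 := by
        rw [PySem.Int.mod_eq_emod_of_pos (by norm_num)]; exact h8
      have hc3 : ctwo n < 3 := by
        by_contra hc
        exact h8 ((mod8_iff n h0).mpr (by omega))
      refine ⟨n, ?_, h0, by omega, le_rfl⟩
      intro acc
      simp only [aLoop8, if_neg h8']
      have hq : ctwo n / 3 = 0 := by omega
      rw [hq]
      simp

theorem loop4_noop (f : Nat) (m : Int) (acc : List Int) (h : ¬ m % 4 = 0) :
    aLoop4 f m acc = (m, acc) := by
  have hnd : ¬ (4 : Int) ∣ m := fun hd => h (Int.emod_eq_zero_of_dvd hd)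
  cases f with
  | zero => rfl
  | succ f => simp [aLoop4, hnd]

theorem loop4_spec (f : Nat) (n : Int) (hf : n.natAbs ≤ f) (h0 : n ≠ 0) (hc : ctwo n ≤ 2) :
    ∃ m, (∀ acc, aLoop4 f n acc = (m, acc ++ (if ctwo n = 2 then [4] else []))) ∧
      m ≠ 0 ∧ ctwo m = ctwo n % 2 ∧ m.natAbs ≤ n.natAbs := by
  by_cases h4 : ctwo n = 2
  · have hm4 : n % 4 = 0 := (mod4_iff n h0).mpr (by omega)
    have hm4' : PySem.Int.mod n 4 = 0 := by
      rw [PySem.Int.mod_eq_emod_of_pos (by norm_num)]; exact hm4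
    have hfd : PySem.Int.floordiv n 4 = n / 4 := PySem.Int.floordiv_eq_ediv_of_pos (by norm_num)
    have h0' : n / 4 ≠ 0 := by omega
    have e1 : n / 4 = n / 2 / 2 := by omega
    have hc4 : ctwo (n / 4) = 0 := by
      have c1 := ctwo_even n h0 (by omega)
      have c2 := ctwo_even (n / 2) (by omega) (by omega)
      rw [e1]; omega
    have hstop : ¬ (n / 4) % 4 = 0 := by
      intro hm
      have := (mod4_iff (n / 4) h0').mp hm
      omega
    obtain ⟨f', rfl⟩ : ∃ f', f = f' + 1 := ⟨f - 1, by omega⟩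
    refine ⟨n / 4, ?_, h0', by rw [hc4, h4], by omega⟩
    intro acc
    simp only [aLoop4, if_pos hm4', hfd]
    rw [loop4_noop f' (n / 4) _ hstop, if_pos h4]
  · have hm4 : ¬ n % 4 = 0 := by
      intro hm
      have := (mod4_iff n h0).mp hm
      omega
    refine ⟨n, ?_, h0, by omega, le_rfl⟩
    intro acc
    rw [loop4_noop f n acc hm4, if_neg h4]
    simp

theorem loop2_noop (f : Nat) (m : Int) (acc : List Int) (h : ¬ m % 2 = 0) :
    aLoop2 f m acc = (m, acc) := by
  have hnd : ¬ (2 : Int) ∣ m := fun hd => h (Int.emod_eq_zero_of_dvd hd)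
  cases f with
  | zero => rfl
  | succ f => simp [aLoop2, hnd]

theorem loop2_spec (f : Nat) (n : Int) (hf : n.natAbs ≤ f) (h0 : n ≠ 0) (hc : ctwo n ≤ 1) :
    ∀ acc, (aLoop2 f n acc).2 = acc ++ (if ctwo n = 1 then [2] else []) := by
  by_cases h2 : ctwo n = 1
  · have hm2 : n % 2 = 0 := (mod2_iff n h0).mpr (by omega)
    have hm2' : PySem.Int.mod n 2 = 0 := by
      rw [PySem.Int.mod_eq_emod_of_pos (by norm_num)]; exact hm2
    have hfd : PySem.Int.floordiv n 2 = n / 2 := PySem.Int.floordiv_eq_ediv_of_pos (by norm_num)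
    have h0' : n / 2 ≠ 0 := by omega
    have hc2 : ctwo (n / 2) = 0 := by
      have c1 := ctwo_even n h0 hm2
      omega
    have hstop : ¬ (n / 2) % 2 = 0 := by
      intro hm
      have := (mod2_iff (n / 2) h0').mp hm
      omega
    obtain ⟨f', rfl⟩ : ∃ f', f = f' + 1 := ⟨f - 1, by omega⟩
    intro acc
    simp only [aLoop2, if_pos hm2', hfd]
    rw [loop2_noop f' (n / 2) _ hstop, if_pos h2]
  · have hm2 : ¬ n % 2 = 0 := by
      intro hm
      have := (mod2_iff n h0).mp hm
      omega
    intro acc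
    rw [loop2_noop f n acc hm2, if_neg h2]
    simp

-- ===== VERDICT (by name: the statement is the Claim_ definition above) =====
theorem radix_plan_pow2_py_spec : Claim_equal_radix_plan_pow2_py := by
  unfold Claim_equal_radix_plan_pow2_py
  intro n _ hpre
  unfold Spec_radix_plan_pow2_py radix_plan_pow2_py radix_plan_pow2_py_alt
  have hk : (bCount n.natAbs n 0).2 = ctwo n := rfl
  obtain ⟨m1, h8, hm1, hc1, hb1⟩ := loop8_spec n.natAbs n le_rfl hpre
  obtain ⟨m2, h4, hm2, hc2, hb2⟩ := loop4_spec n.natAbs m1 (by omega) hm1 (by omega)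
  have h2 := loop2_spec n.natAbs m2 (by omega) hm2 (by omega)
  simp only [hk, h8, h4, h2, hc1, hc2, List.nil_append, List.append_assoc]
  congr 1
  have hr : ctwo n % 3 < 3 := by omega
  interval_cases h : (ctwo n % 3) <;> simp
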